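-- pv_equiv track=rewrite | github.com/marbles-ai/ie | src/python/marbles/ie/ccg/ccgcat.py | split_signature
-- ===== SOURCE A (Python) =====
-- def split_signature(signature):
--     """Split a DRS, or CCG type, into argument and return types.
--
--     Args:
--         signature: The DRS or CCG signature.
--
--     Returns:
--         A 3-tuple of <return type>, [\/], <argument type>. Basic non-functor types are encoded:
--         <basic-type>, '', ''
--
--     See Also:
--         marbles.ie.ccg.ccgcat.Category
--     """
--     b = 0
--     for i in reversed(range(len(signature))):
--         if signature[i] == ')':
--             b += 1
--         elif signature[i] == '(':
--             b -= 1
--         elif b == 0 and signature[i] in ['/', '\\']: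
--             ret = signature[0:i]
--             arg = signature[i+1:]
--             if ret[-1] == ')' and ret[0] == '(':
--                 ret = ret[1:-1]
--             if arg[-1] == ')' and arg[0] == '(':
--                 arg = arg[1:-1]
--             return ret, signature[i], arg
--     return signature, '', ''
-- ===== SOURCE B (Python) =====
-- def _strip_parens(s):
--     if s[-1] == ')' and s[0] == '(':
--         return s[1:-1]
--     return s
--
--
-- def split_signature(signature):
--     """Split a DRS, or CCG type, into argument and return types.
--
--     Forward two-pass version: first count the overall bracket surplus, then one
--     left-to-right sweep records the LAST slash whose prefix bracket balance
--     equals that surplus (equivalently: whose suffix is bracket-balanced).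
--     """
--     total = signature.count(')') - signature.count('(')
--     bal = 0
--     pos = None
--     op = ''
--     for i, c in enumerate(signature):
--         if c == ')':
--             bal += 1
--         elif c == '(':
--             bal -= 1
--         elif bal == total and (c == '/' or c == '\\'):
--             pos = i
--             op = c
--     if pos is None:
--         return signature, '', ''
--     return _strip_parens(signature[:pos]), op, _strip_parens(signature[pos + 1:])
-- ===== Notes on version B (the rewrite author's own statement) =====
-- stated objective: alternative
-- what changed: Replaces A's single right-to-left scan with early return by two forward passes: first count the whole string's bracket surplus, then one left-to-right sweep that records the last slash whose prefix bracket balance equals that surplus, splitting afterwards.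
import Mathlib
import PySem

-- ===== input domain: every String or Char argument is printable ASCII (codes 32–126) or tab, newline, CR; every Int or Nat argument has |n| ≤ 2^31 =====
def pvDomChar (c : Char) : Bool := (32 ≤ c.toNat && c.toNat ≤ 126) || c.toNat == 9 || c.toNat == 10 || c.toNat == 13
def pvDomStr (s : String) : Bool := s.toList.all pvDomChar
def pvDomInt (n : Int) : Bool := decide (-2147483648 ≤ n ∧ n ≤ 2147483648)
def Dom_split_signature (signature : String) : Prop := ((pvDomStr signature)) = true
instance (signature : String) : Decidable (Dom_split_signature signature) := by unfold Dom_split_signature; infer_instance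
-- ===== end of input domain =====

-- B restructures A's right-to-left scan-with-early-return as two forward passes (objective: alternative decomposition, same cost).
-- Neither version mutates its argument; the equivalence is about the return value.

-- ===== PORT A =====
-- Python A's inline stripping `ret = ret[1:-1]` guarded by ret[-1]==')' and ret[0]=='('
-- (inside Pre_ both sides are nonempty, so the getLastD/headD defaults are never consulted)
def splitA_strip (l : List Char) : List Char :=
  if l.getLastD ' ' = ')' ∧ l.headD ' ' = '(' then (l.drop 1).dropLast else l

-- the `for i in reversed(range(len(signature)))` loop with bracket counter b and early return
def split_signature_go (cs : List Char) (idxs : List Nat) (b : Int) :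
    String × String × String :=
  match idxs with
  | [] => (String.ofList cs, "", "")
  | i :: rest =>
    let c := cs.getD i ' '
    if c = ')' then split_signature_go cs rest (b + 1)
    else if c = '(' then split_signature_go cs rest (b - 1)
    else if b = 0 ∧ (c = '/' ∨ c = '\\') then
      (String.ofList (splitA_strip (cs.take i)), String.ofList [c],
       String.ofList (splitA_strip (cs.drop (i + 1))))
    else split_signature_go cs rest b

def split_signature (signature : String) : String × String × String :=
  split_signature_go signature.toList ((List.range signature.toList.length).reverse) 0

-- ===== PORT B =====
def splitB_strip (l : List Char) : List Char :=
  if l.getLastD ' ' = ')' ∧ l.headD ' ' = '(' then (l.drop 1).dropLast else l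

-- the `for i, c in enumerate(signature)` loop: forward sweep recording the last matching slash
def splitB_go (l : List Char) (i : Nat) (bal total : Int)
    (pos : Option Nat) (op : List Char) : Option Nat × List Char :=
  match l with
  | [] => (pos, op)
  | c :: rest =>
    if c = ')' then splitB_go rest (i + 1) (bal + 1) total pos op
    else if c = '(' then splitB_go rest (i + 1) (bal - 1) total pos op
    else if bal = total ∧ (c = '/' ∨ c = '\\') then splitB_go rest (i + 1) bal total (some i) [c]
    else splitB_go rest (i + 1) bal total pos op

def split_signature_alt (signature : String) : String × String × String :=
  let l := signature.toList
  let total : Int := (l.count ')' : Int) - (l.count '(' : Int)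
  match splitB_go l 0 0 total none [] with
  | (none, _) => (signature, "", "")
  | (some p, op) =>
    (String.ofList (splitB_strip (l.take p)), String.ofList op,
     String.ofList (splitB_strip (l.drop (p + 1))))

-- ===== PRECONDITION & SPEC =====
-- spec-level description of the split position: the rightmost '/' or '\' whose suffix is bracket-balanced
def pvBal (l : List Char) : Int := (l.count ')' : Int) - (l.count '(' : Int)
def pvCond (cs : List Char) (j : Nat) : Bool :=
  (cs.getD j ' ' = '/' || cs.getD j ' ' = '\\') && (pvBal (cs.drop (j + 1)) == 0)
def pvIdx? (cs : List Char) : Option Nat :=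
  ((List.range cs.length).reverse).find? (pvCond cs)

-- Pre_ excludes exactly the inputs on which Python A raises IndexError: those where the chosen
-- split position is the first or last character, so `ret` or `arg` is empty when `[-1]` is read.
def Pre_split_signature (signature : String) : Prop :=
  ((pvIdx? signature.toList).all
    (fun i => decide (0 < i) && decide (i + 1 < signature.toList.length))) = true
instance (signature : String) : Decidable (Pre_split_signature signature) := by
  unfold Pre_split_signature; infer_instance

def pvWitness_split_signature : String := "S/N"

def Spec_split_signature (signature : String) (out : String × String × String) : Prop :=
  out = split_signature_alt signature
instance (signature : String) (out : String × String × String) :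
    Decidable (Spec_split_signature signature out) := by
  unfold Spec_split_signature; infer_instance

-- ===== CLAIM (what is proved, stated in full; the proofs are below) =====
def Claim_equal_split_signature : Prop :=
  ∀ (signature : String), Dom_split_signature signature → Pre_split_signature signature →
    Spec_split_signature signature (split_signature signature)

-- ===== LEMMAS AND PROOFS =====

-- result shape both loops are reduced to
def pvMkRes (cs : List Char) : Option Nat → String × String × String
  | none => (String.ofList cs, "", "")
  | some j => (String.ofList (splitA_strip (cs.take j)), String.ofList [cs.getD j ' '],
               String.ofList (splitA_strip (cs.drop (j + 1))))

theorem pvBal_cons (c : Char) (l : List Char) :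
    pvBal (c :: l) = pvBal l + (if c = ')' then 1 else 0) - (if c = '(' then 1 else 0) := by
  simp only [pvBal, List.count_cons]
  split_ifs <;> simp_all <;> push_cast <;> ring

theorem pvBal_append (a b : List Char) : pvBal (a ++ b) = pvBal a + pvBal b := by
  simp only [pvBal, List.count_append]; push_cast; ring

theorem splitA_go_spec (cs : List Char) :
    ∀ i, i ≤ cs.length →
      split_signature_go cs ((List.range i).reverse) (pvBal (cs.drop i)) =
        pvMkRes cs (((List.range i).reverse).find? (pvCond cs)) := by
  intro i
  induction i with
  | zero => intro _; simp [split_signature_go, pvMkRes]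
  | succ i IH =>
    intro h
    have hi : i < cs.length := by omega
    have hdrop : cs.drop i = cs[i] :: cs.drop (i + 1) := List.drop_eq_getElem_cons hi
    have hgd : cs.getD i ' ' = cs[i] := by
      simp [List.getD, List.getElem?_eq_getElem hi]
    have hgd' : cs[i]? = some cs[i] := List.getElem?_eq_getElem hi
    have hcons : (List.range (i + 1)).reverse = i :: (List.range i).reverse := by
      rw [List.range_succ, List.reverse_append]; rfl
    have hb := pvBal_cons cs[i] (cs.drop (i + 1))
    rw [← hdrop] at hb
    rw [hcons, split_signature_go]
    simp only [hgd, List.find?_cons]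
    by_cases h1 : cs[i] = ')'
    · have hc : pvCond cs i = false := by
        simp only [pvCond, hgd]; simp [h1]
      have harg : pvBal (cs.drop (i + 1)) + 1 = pvBal (cs.drop i) := by
        rw [hb]; simp [h1]
      rw [if_pos h1, harg, IH (by omega), hc]
    · by_cases h2 : cs[i] = '('
      · have hc : pvCond cs i = false := by
          simp only [pvCond, hgd]; simp [h2]
        have harg : pvBal (cs.drop (i + 1)) - 1 = pvBal (cs.drop i) := by
          rw [hb]; simp [h1, h2]
        rw [if_neg h1, if_pos h2, harg, IH (by omega), hc]
      · by_cases h3 : pvBal (cs.drop (i + 1)) = 0 ∧ (cs[i] = '/' ∨ cs[i] = '\\')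
        · have hc : pvCond cs i = true := by
            simp only [pvCond, hgd]
            rcases h3.2 with hs | hs <;> simp [hs, h3.1]
          rw [if_neg h1, if_neg h2, if_pos h3, hc]
          simp [pvMkRes, hgd']

        · have hc : pvCond cs i = false := by
            simp only [pvCond, hgd]
            by_cases hz : pvBal (cs.drop (i + 1)) = 0
            · have hs : ¬(cs[i] = '/' ∨ cs[i] = '\\') := fun hs => h3 ⟨hz, hs⟩
              push_neg at hs
              simp [hs.1, hs.2]
            · simp [hz]
          have harg : pvBal (cs.drop (i + 1)) = pvBal (cs.drop i) := by
            rw [hb]; simp [h1, h2]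
          rw [if_neg h1, if_neg h2, if_neg h3, harg, IH (by omega), hc]

theorem splitB_go_spec (cs : List Char) :
    ∀ (l : List Char) (k : Nat) (pos : Option Nat) (op : List Char), cs.drop k = l →
      splitB_go l k (pvBal (cs.take k)) (pvBal cs) pos op =
        (match ((List.range' k l.length).reverse).find? (pvCond cs) with
         | none => (pos, op)
         | some j => (some j, [cs.getD j ' '])) := by
  intro l
  induction l with
  | nil => intro k pos op _; simp [splitB_go, List.range']
  | cons c rest IH =>
    intro k pos op hk
    have hklen : k < cs.length := by
      have := congrArg List.length hk
      simp [List.length_drop] at this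
      omega
    have hdrop : cs.drop k = cs[k] :: cs.drop (k + 1) := List.drop_eq_getElem_cons hklen
    have hinj : cs[k] :: cs.drop (k + 1) = c :: rest := hdrop.symm.trans hk
    have hck : cs[k] = c := (List.cons.injEq _ _ _ _ ▸ hinj).1
    have hrest : cs.drop (k + 1) = rest := (List.cons.injEq _ _ _ _ ▸ hinj).2
    have hgd : cs.getD k ' ' = c := by
      simp [List.getD, List.getElem?_eq_getElem hklen, hck]
    have hgd' : cs[k]? = some c := by rw [List.getElem?_eq_getElem hklen, hck]
    have htake : cs.take (k + 1) = cs.take k ++ [c] := by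
      rw [List.take_add_one, List.getElem?_eq_getElem hklen, hck]; rfl
    have hbt : pvBal (cs.take (k + 1)) =
        pvBal (cs.take k) + (if c = ')' then 1 else 0) - (if c = '(' then 1 else 0) := by
      rw [htake, pvBal_append, pvBal_cons]
      simp [pvBal]; ring
    have hcons : (List.range' k (rest.length + 1)).reverse =
        (List.range' (k + 1) rest.length).reverse ++ [k] := by
      rw [List.range'_succ, List.reverse_cons]
    rw [splitB_go]
    simp only [List.length_cons, hcons, List.find?_append]
    by_cases h1 : c = ')'
    · have hc : pvCond cs k = false := by
        simp only [pvCond, hgd]; simp [h1]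
      have harg : pvBal (cs.take k) + 1 = pvBal (cs.take (k + 1)) := by
        rw [hbt]; simp [h1]
      rw [if_pos h1, harg, IH (k + 1) pos op hrest]
      cases hfind : ((List.range' (k + 1) rest.length).reverse).find? (pvCond cs) <;>
        simp [hfind, List.find?, hc]
    · by_cases h2 : c = '('
      · have hc : pvCond cs k = false := by
          simp only [pvCond, hgd]; simp [h2]
        have harg : pvBal (cs.take k) - 1 = pvBal (cs.take (k + 1)) := by
          rw [hbt]; simp [h1, h2]
        rw [if_neg h1, if_pos h2, harg, IH (k + 1) pos op hrest]
        cases hfind : ((List.range' (k + 1) rest.length).reverse).find? (pvCond cs) <;>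
          simp [hfind, List.find?, hc]
      · have harg : pvBal (cs.take k) = pvBal (cs.take (k + 1)) := by
          rw [hbt]; simp [h1, h2]
        have hkey : (pvBal (cs.take k) = pvBal cs) ↔ pvBal (cs.drop (k + 1)) = 0 := by
          have hsplit : pvBal cs = pvBal (cs.take k) + pvBal (cs.drop k) := by
            conv_lhs => rw [← List.take_append_drop k cs]
            exact pvBal_append _ _
          rw [hdrop, pvBal_cons] at hsplit
          rw [hsplit]; simp [hck, h1, h2]
        by_cases h3 : pvBal (cs.take k) = pvBal cs ∧ (c = '/' ∨ c = '\\')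
        · have hc : pvCond cs k = true := by
            simp only [pvCond, hgd]
            rcases h3.2 with hs | hs <;> simp [hs, hkey.mp h3.1]
          rw [if_neg h1, if_neg h2, if_pos h3, harg, IH (k + 1) (some k) [c] hrest]
          cases hfind : ((List.range' (k + 1) rest.length).reverse).find? (pvCond cs) with
          | none => simp [hfind, List.find?, hc, hgd']
          | some j => simp [hfind]
        · have hc : pvCond cs k = false := by
            simp only [pvCond, hgd]
            by_cases hz : pvBal (cs.drop (k + 1)) = 0
            · have hs : ¬(c = '/' ∨ c = '\\') := fun hs => h3 ⟨hkey.mpr hz, hs⟩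
              push_neg at hs
              simp [hs.1, hs.2]
            · simp [hz]
          rw [if_neg h1, if_neg h2, if_neg h3, harg, IH (k + 1) pos op hrest]
          cases hfind : ((List.range' (k + 1) rest.length).reverse).find? (pvCond cs) <;>
            simp [hfind, List.find?, hc]

-- ===== VERDICT (by name: the statement is the Claim_ definition above) =====
theorem split_signature_spec : Claim_equal_split_signature := by
  unfold Claim_equal_split_signature
  intro s _ _
  unfold Spec_split_signature split_signature split_signature_alt
  have hA := splitA_go_spec s.toList s.toList.length (le_refl _)
  rw [List.drop_length] at hA
  have hz : pvBal ([] : List Char) = 0 := rfl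
  rw [hz] at hA
  have hB := splitB_go_spec s.toList s.toList 0 none [] (by simp)
  have ht0 : pvBal (List.take 0 s.toList) = 0 := rfl
  rw [ht0, ← List.range_eq_range'] at hB
  have htot : ((s.toList.count ')' : Int) - (s.toList.count '(' : Int)) = pvBal s.toList := rfl
  simp only [htot]
  rw [hA, hB]
  cases hidx : ((List.range s.toList.length).reverse).find? (pvCond s.toList) with
  | none => simp [hidx, pvMkRes, String.ofList_toList]
  | some j => simp [hidx, pvMkRes, splitA_strip, splitB_strip]
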